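-- pv_equiv track=rewrite | github.com/amansatyawali/notes | dsa/sorting/partition.py | is_partitioned
-- ===== SOURCE A (Python) =====
-- def is_partitioned(prtitn_el, res):
--     prtitn_el_found = False
--     for i in res:
--         if i == prtitn_el:
--             prtitn_el_found = True
--
--         if (i >= prtitn_el and not prtitn_el_found) or (i < prtitn_el and prtitn_el_found):
--             return  False
--
--     return True
-- ===== SOURCE B (Python) =====
-- def is_partitioned(prtitn_el, res):
--     idx = res.index(prtitn_el) if prtitn_el in res else len(res)
--     return all(x < prtitn_el for x in res[:idx]) and all(x >= prtitn_el for x in res[idx:])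
-- ===== Notes on version B (the rewrite author's own statement) =====
-- stated objective: simpler
-- what changed: Replaces A's flag-driven single scan with locating the first occurrence of the partition element once and then validating the left (< el) and right (>= el) slices in two separate passes.
import Mathlib
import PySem

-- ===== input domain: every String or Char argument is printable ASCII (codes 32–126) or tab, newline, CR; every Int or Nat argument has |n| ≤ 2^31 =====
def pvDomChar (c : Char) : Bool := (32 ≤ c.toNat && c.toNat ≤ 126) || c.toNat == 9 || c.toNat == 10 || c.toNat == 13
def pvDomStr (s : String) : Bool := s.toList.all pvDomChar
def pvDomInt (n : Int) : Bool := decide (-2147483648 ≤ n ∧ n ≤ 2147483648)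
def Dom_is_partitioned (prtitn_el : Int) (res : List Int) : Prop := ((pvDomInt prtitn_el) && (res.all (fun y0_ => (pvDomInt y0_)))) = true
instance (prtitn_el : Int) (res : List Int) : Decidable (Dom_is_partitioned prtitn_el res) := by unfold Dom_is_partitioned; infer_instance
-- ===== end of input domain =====

-- B locates the first occurrence of the partition element once, then validates the left and right slices in two passes; objective: simpler.

-- ===== PORT A =====
-- the for-loop over res carrying the prtitn_el_found flag
def isPartGo (prtitn_el : Int) (l : List Int) (found : Bool) : Bool :=
  match l with
  | [] => true
  | i :: rest =>
    let found' := if i == prtitn_el then true else found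
    if (prtitn_el ≤ i ∧ found' = false) ∨ (i < prtitn_el ∧ found' = true) then false
    else isPartGo prtitn_el rest found'

def is_partitioned (prtitn_el : Int) (res : List Int) : Bool :=
  isPartGo prtitn_el res false

-- ===== PORT B =====
def is_partitioned_alt (prtitn_el : Int) (res : List Int) : Bool :=
  let idx : Nat :=
    if res.contains prtitn_el then (PySem.List.index? res prtitn_el).getD 0
    else res.length
  ((PySem.List.slice res none (some (idx : Int))).all (fun x => decide (x < prtitn_el))) &&
  ((PySem.List.slice res (some (idx : Int)) none).all (fun x => decide (prtitn_el ≤ x)))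

-- ===== PRECONDITION & SPEC =====
def Spec_is_partitioned (prtitn_el : Int) (res : List Int) (out : Bool) : Prop := out = is_partitioned_alt prtitn_el res
instance (prtitn_el : Int) (res : List Int) (out : Bool) : Decidable (Spec_is_partitioned prtitn_el res out) := by unfold Spec_is_partitioned; infer_instance

-- ===== CLAIM (what is proved, stated in full; the proofs are below) =====
def Claim_equal_is_partitioned : Prop := ∀ (prtitn_el : Int) (res : List Int), Dom_is_partitioned prtitn_el res → Spec_is_partitioned prtitn_el res (is_partitioned prtitn_el res)

-- ===== LEMMAS AND PROOFS =====

theorem alt_take_drop (p : Int) (res : List Int) :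
    is_partitioned_alt p res =
      (((res.take (if res.contains p then (PySem.List.index? res p).getD 0 else res.length)).all
          (fun x => decide (x < p))) &&
       ((res.drop (if res.contains p then (PySem.List.index? res p).getD 0 else res.length)).all
          (fun x => decide (p ≤ x)))) := by
  simp only [is_partitioned_alt, PySem.List.slice_to_natCast, PySem.List.slice_from_natCast]

theorem alt_cons_self (p : Int) (rest : List Int) :
    is_partitioned_alt p (p :: rest) = rest.all (fun x => decide (p ≤ x)) := by
  have hc : (p :: rest).contains p = true := by simp
  rw [alt_take_drop, hc, if_pos rfl, PySem.List.index?_cons_self p rest]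
  simp

theorem alt_cons_ne (p i : Int) (rest : List Int) (h : i ≠ p) :
    is_partitioned_alt p (i :: rest) = (decide (i < p) && is_partitioned_alt p rest) := by
  rw [alt_take_drop, alt_take_drop]
  have hne : ¬ (i == p) = true := by simp [h]
  rw [PySem.List.index?_cons_of_ne rest h]
  by_cases hm : p ∈ rest
  · have hnn : PySem.List.index? rest p ≠ none := by
      rw [Ne, PySem.List.index?_eq_none_iff]
      exact fun hc => hc hm
    obtain ⟨k, hk⟩ := Option.ne_none_iff_exists'.mp hnn
    rw [PySem.List.index?_eq_idxOf?] at hk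
    simp [hm, hk, Bool.and_assoc]
  · simp [hm, Ne.symm h]

theorem go_true (p : Int) (l : List Int) :
    isPartGo p l true = l.all (fun x => decide (p ≤ x)) := by
  induction l with
  | nil => rfl
  | cons i rest ih =>
    unfold isPartGo
    by_cases hip : p ≤ i
    · simp [hip, not_lt.mpr hip, ih]
    · simp [hip, not_le.mp hip]

theorem go_false_eq_alt (p : Int) (l : List Int) :
    isPartGo p l false = is_partitioned_alt p l := by
  induction l with
  | nil => rfl
  | cons i rest ih =>
    by_cases hip : i = p
    · subst hip
      unfold isPartGo
      simp [go_true, alt_cons_self]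
    · unfold isPartGo
      have hne : (i == p) = false := by simp [hip]
      rw [alt_cons_ne p i rest hip]
      by_cases hle : p ≤ i
      · simp [hne, hle, not_lt.mpr hle]
      · simp [hne, hle, not_le.mp hle, ih]

-- ===== VERDICT (by name: the statement is the Claim_ definition above) =====
theorem is_partitioned_spec : Claim_equal_is_partitioned := by
  intro p res _
  unfold Spec_is_partitioned is_partitioned
  exact go_false_eq_alt p res
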